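-- pv_equiv track=rewrite | github.com/aayasin/perf-tools | lbr.py | get_taken_idx
-- ===== SOURCE A (Python) =====
-- def is_taken(line):   return '# ' in line
--
-- def get_taken_idx(sample, n):
--   i = len(sample)-1
--   while i >= 0:
--     if is_taken(sample[i]):
--       n += 1
--       if n==0:
--         break
--     i -= 1
--   return i
-- ===== SOURCE B (Python) =====
-- def is_taken(line):   return '# ' in line
--
-- def get_taken_idx(sample, n):
--   taken = [i for i, line in enumerate(sample) if is_taken(line)]
--   if n < 0 and -n <= len(taken):
--     return taken[n]
--   return -1
-- ===== Notes on version B (the rewrite author's own statement) =====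
-- stated objective: alternative
-- what changed: Replaces the backward while-loop with a mutable counter by a forward comprehension collecting all taken-line indices followed by a single negative-index lookup taken[n] guarded for range.
import Mathlib
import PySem

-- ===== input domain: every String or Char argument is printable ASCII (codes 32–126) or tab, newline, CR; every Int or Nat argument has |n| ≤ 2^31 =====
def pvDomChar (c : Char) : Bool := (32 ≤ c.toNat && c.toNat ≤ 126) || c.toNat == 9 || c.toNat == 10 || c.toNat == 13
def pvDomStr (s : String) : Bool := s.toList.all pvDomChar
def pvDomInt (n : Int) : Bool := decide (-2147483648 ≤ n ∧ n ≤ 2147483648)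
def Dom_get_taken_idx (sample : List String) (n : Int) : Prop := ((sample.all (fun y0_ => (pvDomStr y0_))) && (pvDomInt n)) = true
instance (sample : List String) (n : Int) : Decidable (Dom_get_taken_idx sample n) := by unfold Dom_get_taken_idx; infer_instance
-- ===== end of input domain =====

-- B replaces A's backward scan with a mutable counter by a forward index table plus one guarded negative lookup (objective: alternative).

-- ===== PORT A =====
def is_taken (line : String) : Bool := PySem.Str.isIn "# " line

-- A's while loop, descending i from len-1 to -1; k = i+1 (k = 0 ↔ i = -1, loop over).
def getTakenIdxLoop (sample : List String) : Nat → Int → Int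
  | 0, _ => -1
  | k+1, n =>
    if is_taken (sample[k]?.getD "") then
      (if n + 1 == 0 then (k : Int) else getTakenIdxLoop sample k (n + 1))
    else getTakenIdxLoop sample k n

def get_taken_idx (sample : List String) (n : Int) : Int :=
  getTakenIdxLoop sample sample.length n

-- ===== PORT B =====
def get_taken_idx_alt (sample : List String) (n : Int) : Int :=
  let taken : List Int := ((PySem.List.enumerate sample 0).filter (fun p => is_taken p.2)).map (·.1)
  if n < 0 ∧ -n ≤ (taken.length : Int) then (PySem.List.pyGet? taken n).getD (-1) else -1

-- ===== PRECONDITION & SPEC =====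
def Spec_get_taken_idx (sample : List String) (n : Int) (out : Int) : Prop := out = get_taken_idx_alt sample n
instance (sample : List String) (n : Int) (out : Int) : Decidable (Spec_get_taken_idx sample n out) := by unfold Spec_get_taken_idx; infer_instance

-- ===== CLAIM (what is proved, stated in full; the proofs are below) =====
def Claim_equal_get_taken_idx : Prop := ∀ (sample : List String) (n : Int), Dom_get_taken_idx sample n → Spec_get_taken_idx sample n (get_taken_idx sample n)

-- ===== LEMMAS AND PROOFS =====

-- indices < k (forward order) of taken lines
def tkP (sample : List String) (k : Nat) : List Int :=
  ((List.range k).filter (fun i => is_taken (sample[i]?.getD ""))).map (fun i => (i : Int))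

-- B's lookup in closed form
def pick (t : List Int) (n : Int) : Int :=
  if n < 0 ∧ -n ≤ (t.length : Int) then t.getD (t.length - (-n).toNat) (-1) else -1

theorem pick_append_singleton (t : List Int) (x : Int) (n : Int) :
    pick (t ++ [x]) n = if n = -1 then x else pick t (n + 1) := by
  unfold pick
  by_cases h : n = -1
  · subst h
    rw [if_pos ⟨by omega, by simp⟩, if_pos rfl]
    simp [List.getD_eq_getElem?_getD]
  · rw [if_neg h]
    by_cases hg : n + 1 < 0 ∧ -(n + 1) ≤ (t.length : Int)
    · rw [if_pos hg, if_pos (by simp only [List.length_append, List.length_cons, List.length_nil]; push_cast; omega)]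
      have hm : (t ++ [x]).length - (-n).toNat = t.length - (-(n+1)).toNat := by
        simp only [List.length_append, List.length_cons, List.length_nil]; omega
      have hlt : t.length - (-(n+1)).toNat < t.length := by omega
      simp only [List.getD_eq_getElem?_getD]
      rw [hm, List.getElem?_append_left hlt]
    · rw [if_neg hg, if_neg (by simp only [List.length_append, List.length_cons, List.length_nil]; push_cast at hg ⊢; omega)]

theorem loop_eq_pick (sample : List String) (k : Nat) (n : Int) :
    getTakenIdxLoop sample k n = pick (tkP sample k) n := by
  induction k generalizing n with
  | zero => simp [getTakenIdxLoop, tkP, pick]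
  | succ k ih =>
    by_cases h : is_taken (sample[k]?.getD "")
    · have hrange : tkP sample (k+1) = tkP sample k ++ [(k : Int)] := by
        simp [tkP, List.range_succ, h]
      rw [hrange]
      unfold getTakenIdxLoop
      rw [if_pos h, pick_append_singleton]
      by_cases hn : n + 1 = 0
      · have hn' : n = -1 := by omega
        subst hn'; simp
      · rw [if_neg (by simpa using hn), if_neg (by omega), ih]
    · have hrange : tkP sample (k+1) = tkP sample k := by
        simp [tkP, List.range_succ, h]
      rw [hrange]
      unfold getTakenIdxLoop
      rw [if_neg h, ih]

theorem taken_eq_tkP (sample : List String) :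
    ((PySem.List.enumerate sample 0).filter (fun p => is_taken p.2)).map (·.1) =
      tkP sample sample.length := by
  rw [PySem.List.enumerate_eq_map_pyRange sample ""]
  simp only [PySem.List.len_eq]
  rw [PySem.List.pyRange_zero_natCast]
  unfold tkP
  simp only [List.filter_map, List.map_map, Function.comp_def, PySem.List.pyGetD_natCast,
    List.getD_eq_getElem?_getD]
  generalize List.filter _ (List.range sample.length) = l
  induction l with
  | nil => rfl
  | cons a l ih => simpa using ih

theorem alt_eq_pick (sample : List String) (n : Int) :
    get_taken_idx_alt sample n = pick (tkP sample sample.length) n := by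
  unfold get_taken_idx_alt pick
  rw [taken_eq_tkP]
  by_cases hg : n < 0 ∧ -n ≤ ((tkP sample sample.length).length : Int)
  · rw [if_pos hg, if_pos hg]
    obtain ⟨h1, h2⟩ := hg
    have hn : n = -(((-n).toNat : Nat) : Int) := by omega
    conv_lhs => rw [hn]
    rw [PySem.List.pyGet?_neg_natCast _ _ (by omega) (by omega),
      List.getD_eq_getElem?_getD]
  · rw [if_neg hg, if_neg hg]

-- ===== VERDICT (by name: the statement is the Claim_ definition above) =====
theorem get_taken_idx_spec : Claim_equal_get_taken_idx := by
  intro sample n _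
  unfold Spec_get_taken_idx get_taken_idx
  rw [loop_eq_pick, alt_eq_pick]
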